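-- pv_equiv track=rewrite | github.com/JacobAraujo/Parser-Descendente-Recursivo | parser-descendente-recursivo.py | moreThanOneRegister
-- ===== SOURCE A (Python) =====
-- def parserValue(tokens):
--     return True
--
-- def moreThanOneValue(tokens):
--     if tokens[0] == ',':
--         tokens.pop(0)
--         if parserValue(tokens):
--             tokens.pop(0)
--             tokens = moreThanOneValue(tokens)
--     return tokens
--
-- def moreThanOneRegister(tokens):
--     if tokens[0] == ',':
--         tokens.pop(0)
--         if tokens[0] == '(':
--             tokens.pop(0)
--             if parserValue(tokens):
--                 tokens.pop(0)
--                 tokens = moreThanOneValue(tokens)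
--                 if tokens[0] == ')':
--                     tokens.pop(0)
--                     tokens = moreThanOneRegister(tokens)
--     return tokens
-- ===== SOURCE B (Python) =====
-- def moreThanOneRegister(tokens):
--     # Single index scan over the list (no repeated pop(0)), then one slice deletion.
--     # Side effect: like A, the same list object is truncated in place and returned.
--     # tokens[i] on an exhausted list raises IndexError, as A's tokens[0]/pop(0) does.
--     i = 0
--     while tokens[i] == ',':
--         i += 1
--         if tokens[i] != '(':
--             break
--         i += 2
--         while tokens[i] == ',':
--             i += 2
--         if tokens[i] != ')':
--             break
--         i += 1
--     del tokens[:i]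
--     return tokens
-- ===== Notes on version B (the rewrite author's own statement) =====
-- stated objective: alternative
-- what changed: A consumes the list by recursive descent with repeated tokens.pop(0); B computes the consumed prefix length with a single index scan (nested while loops, no mutation during the scan) and then truncates the front once with del tokens[:i].
import Mathlib
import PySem

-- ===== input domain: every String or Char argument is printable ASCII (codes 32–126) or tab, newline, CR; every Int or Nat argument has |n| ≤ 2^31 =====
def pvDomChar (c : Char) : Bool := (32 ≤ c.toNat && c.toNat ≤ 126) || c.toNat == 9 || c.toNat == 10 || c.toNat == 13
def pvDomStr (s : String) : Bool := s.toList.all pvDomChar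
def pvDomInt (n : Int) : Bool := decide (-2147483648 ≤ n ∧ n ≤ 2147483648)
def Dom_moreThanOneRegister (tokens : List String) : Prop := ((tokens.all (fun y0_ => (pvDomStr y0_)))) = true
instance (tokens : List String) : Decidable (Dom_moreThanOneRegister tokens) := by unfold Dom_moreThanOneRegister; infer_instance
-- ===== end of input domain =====

-- B replaces A's recursive pop(0)-at-a-time consumption by a single index scan
-- followed by one front deletion (return value proved equal; both truncate the
-- list from the front in place, B with one `del tokens[:i]`).

-- ===== PORT A =====
-- moreThanOneValue: `none` models the IndexError raised by tokens.pop(0)/tokens[0] on [].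
def pvMTOV : List String → Option (List String)
  | [] => none
  | t :: rest =>
    if t = "," then
      match rest with
      | [] => none
      | _ :: r => pvMTOV r
    else some (t :: rest)

def pvMTORaF : Nat → List String → Option (List String)
  | 0, _ => none          -- fuel guard only (never reached with fuel > |tokens|)
  | _ + 1, [] => none
  | f + 1, t :: rest =>
    if t = "," then
      match rest with
      | [] => none
      | u :: rest2 =>
        if u = "(" then
          match rest2 with
          | [] => none
          | _ :: rest3 =>
            match pvMTOV rest3 with
            | none => none
            | some [] => none
            | some (w :: rest4) => if w = ")" then pvMTORaF f rest4 else some (w :: rest4)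
        else some (u :: rest2)
    else some (t :: rest)

-- A returns the (mutated) list; on the inputs admitted by Pre_ the Option is some.
def moreThanOneRegister (tokens : List String) : List String := (pvMTORaF (tokens.length + 1) tokens).getD []

-- ===== PORT B =====
-- inner while loop of Source B: skip ','-value pairs, returns the final index
-- (the `i < ts.length` guard is the totality guard for Python's tokens[i],
--  which raises IndexError out of range — those inputs are outside Pre_)
def pvScanVF (ts : List String) : Nat → Nat → Nat
  | 0, i => i             -- fuel guard only (fuel = |ts| always suffices)
  | f + 1, i => if i < ts.length ∧ ts[i]! = "," then pvScanVF ts f (i + 2) else i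

-- outer while loop of Source B
def pvScanRF (ts : List String) : Nat → Nat → Nat
  | 0, i => i             -- fuel guard only (fuel = |ts| + 1 always suffices)
  | f + 1, i =>
    if i < ts.length ∧ ts[i]! = "," then
      if i + 1 < ts.length ∧ ts[i + 1]! = "(" then
        let j := pvScanVF ts ts.length (i + 3)
        if j < ts.length ∧ ts[j]! = ")" then pvScanRF ts f (j + 1) else j
      else i + 1
    else i

def moreThanOneRegister_alt (tokens : List String) : List String :=
  tokens.drop (pvScanRF tokens (tokens.length + 1) 0)

-- ===== PRECONDITION & SPEC =====
-- Pre_ excludes exactly the inputs on which Python A raises IndexError (B raises there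
-- too, at the same probe).  Closed form: read the token list once, left to right,
-- through the five grammar positions of (',' '(' value (',' value)* ')')* — 0 = before
-- an item, 1 = after its ',', 2 = after its '(', 3 = before a value-list token,
-- 4 = after a value-list ',' — and require that the list does not end at a position
-- that still demands a token (every position does, since A probes tokens[0] even after
-- a complete item, so some token must fail to extend the grammar before the list runs out).
def pvOkAux : Nat → List String → Bool
  | _, [] => false
  | 0, t :: r => if t = "," then pvOkAux 1 r else true
  | 1, t :: r => if t = "(" then pvOkAux 2 r else true
  | 2, _ :: r => pvOkAux 3 r
  | 3, t :: r => if t = "," then pvOkAux 4 r else if t = ")" then pvOkAux 0 r else true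
  | 4, _ :: r => pvOkAux 3 r
  | _, _ :: _ => false

def Pre_moreThanOneRegister (tokens : List String) : Prop := pvOkAux 0 tokens = true
instance (tokens : List String) : Decidable (Pre_moreThanOneRegister tokens) := by
  unfold Pre_moreThanOneRegister; infer_instance

def pvWitness_moreThanOneRegister : List String := [",", "(", "7", ",", "x", ")", "end"]

def Spec_moreThanOneRegister (tokens : List String) (out : List String) : Prop := out = moreThanOneRegister_alt tokens
instance (tokens : List String) (out : List String) : Decidable (Spec_moreThanOneRegister tokens out) := by unfold Spec_moreThanOneRegister; infer_instance

-- ===== CLAIM (what is proved, stated in full; the proofs are below) =====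
def Claim_equal_moreThanOneRegister : Prop := ∀ (tokens : List String), Dom_moreThanOneRegister tokens → Pre_moreThanOneRegister tokens → Spec_moreThanOneRegister tokens (moreThanOneRegister tokens)

-- ===== LEMMAS AND PROOFS =====

-- termination helper for pvMTORa (cited in its decreasing_by)
theorem pvMTOV_length : ∀ (ts r : List String), pvMTOV ts = some r → r.length ≤ ts.length
  | [], _, h => by simp [pvMTOV] at h
  | [t], r, h => by
    simp only [pvMTOV] at h
    split at h
    · simp at h
    · simp_all
  | t :: x :: rs, r, h => by
    simp only [pvMTOV] at h
    split at h
    · have := pvMTOV_length rs r h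
      simp; omega
    · simp_all

-- proof-side helpers: fuel-free (well-founded) twins of the ports, bridged to the
-- fueled ports below; all the main lemmas are stated about these
def pvMTORa : List String → Option (List String)
  | [] => none
  | t :: rest =>
    if t = "," then
      match rest with
      | [] => none
      | u :: rest2 =>
        if u = "(" then
          match rest2 with
          | [] => none
          | _ :: rest3 =>
            match h : pvMTOV rest3 with
            | none => none
            | some ts =>
              match ts with
              | [] => none
              | w :: rest4 => if w = ")" then pvMTORa rest4 else some (w :: rest4)
        else some (u :: rest2)
    else some (t :: rest)
termination_by ts => ts.length
decreasing_by
  have := pvMTOV_length rest3 (w :: rest4) h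
  simp at this ⊢; omega

def pvScanV (ts : List String) (i : Nat) : Nat :=
  if h : i < ts.length ∧ ts[i]! = "," then pvScanV ts (i + 2) else i
termination_by ts.length - i
decreasing_by omega

theorem pvScanV_ge (ts : List String) (i : Nat) : i ≤ pvScanV ts i := by
  rw [pvScanV]
  split
  · have := pvScanV_ge ts (i + 2); omega
  · exact le_rfl
termination_by ts.length - i
decreasing_by omega

def pvScanR (ts : List String) (i : Nat) : Nat :=
  if h : i < ts.length ∧ ts[i]! = "," then
    if h2 : i + 1 < ts.length ∧ ts[i + 1]! = "(" then
      let j := pvScanV ts (i + 3)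
      if h3 : j < ts.length ∧ ts[j]! = ")" then pvScanR ts (j + 1) else j
    else i + 1
  else i
termination_by ts.length - i
decreasing_by
  have := pvScanV_ge ts (i + 3)
  omega

-- bridges: with enough fuel the fueled ports equal their well-founded twins
theorem pvMTORa_cons (v : String) (rest3 : List String) :
    pvMTORa ("," :: "(" :: v :: rest3) =
      match pvMTOV rest3 with
      | none => none
      | some [] => none
      | some (w :: rest4) => if w = ")" then pvMTORa rest4 else some (w :: rest4) := by
  rw [pvMTORa]
  simp only [reduceIte]
  split
  · next heq => rw [heq]
  · next ts2 heq =>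
    conv_rhs => rw [heq]
    cases ts2 <;> rfl

theorem pvMTORaF_eq : ∀ (f : Nat) (ts : List String), ts.length < f → pvMTORaF f ts = pvMTORa ts := by
  intro f
  induction f with
  | zero => intro ts h; exact absurd h (by omega)
  | succ f ih =>
    intro ts hlen
    match ts with
    | [] => simp [pvMTORaF, pvMTORa]
    | [t] => rw [pvMTORaF, pvMTORa]
    | [t, u] => rw [pvMTORaF, pvMTORa]
    | t :: u :: v :: rest3 =>
      by_cases ht : t = ","
      · by_cases hu : u = "("
        · subst ht hu
          rw [pvMTORaF, pvMTORa_cons]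
          simp only [reduceIte]
          cases hm : pvMTOV rest3 with
          | none => rfl
          | some ws =>
            cases ws with
            | nil => rfl
            | cons w rest4 =>
              have hl4 := pvMTOV_length rest3 (w :: rest4) hm
              by_cases hw : w = ")"
              · simp only [hw, if_true]
                exact ih rest4 (by simp at hl4 hlen ⊢; omega)
              · simp [hw]
        · rw [pvMTORaF, pvMTORa]; simp [ht, hu]
      · rw [pvMTORaF, pvMTORa]; simp [ht]

theorem pvScanVF_eq : ∀ (f i : Nat) (ts : List String), ts.length ≤ i + f → pvScanVF ts f i = pvScanV ts i := by
  intro f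
  induction f with
  | zero =>
    intro i ts h
    rw [pvScanVF, pvScanV, dif_neg (by rintro ⟨h1, _⟩; omega)]
  | succ f ih =>
    intro i ts h
    rw [pvScanVF, pvScanV]
    by_cases hc : i < ts.length ∧ ts[i]! = ","
    · rw [if_pos hc, dif_pos hc]
      exact ih (i + 2) ts (by omega)
    · rw [if_neg hc, dif_neg hc]

theorem pvScanRF_eq : ∀ (f i : Nat) (ts : List String), ts.length ≤ i + f → pvScanRF ts f i = pvScanR ts i := by
  intro f
  induction f with
  | zero =>
    intro i ts h
    rw [pvScanRF, pvScanR, dif_neg (by rintro ⟨h1, _⟩; omega)]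
  | succ f ih =>
    intro i ts h
    rw [pvScanRF, pvScanR]
    by_cases hc : i < ts.length ∧ ts[i]! = ","
    · rw [if_pos hc, dif_pos hc]
      by_cases hc2 : i + 1 < ts.length ∧ ts[i + 1]! = "("
      · rw [if_pos hc2, dif_pos hc2]
        have hv : pvScanVF ts ts.length (i + 3) = pvScanV ts (i + 3) :=
          pvScanVF_eq ts.length (i + 3) ts (by omega)
        simp only [hv]
        by_cases hc3 : pvScanV ts (i + 3) < ts.length ∧ ts[pvScanV ts (i + 3)]! = ")"
        · rw [if_pos hc3, dif_pos hc3]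
          exact ih _ ts (by have := pvScanV_ge ts (i + 3); omega)
        · rw [if_neg hc3, dif_neg hc3]
      · rw [if_neg hc2, dif_neg hc2]
    · rw [if_neg hc, dif_neg hc]

-- a recursive characterisation of the no-raise condition that
-- mirrors the call structure of the two ports (used only in the proofs below)
def pvSkipV : List String → List String
  | t :: x :: r => if t = "," then pvSkipV r else t :: x :: r
  | ts => ts

theorem pvSkipV_length : ∀ (ts : List String), (pvSkipV ts).length ≤ ts.length
  | [] => by simp [pvSkipV]
  | [t] => by simp [pvSkipV]
  | t :: x :: r => by
    rw [pvSkipV]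
    split
    · have := pvSkipV_length r; simp; omega
    · simp

def pvOkV : List String → Bool
  | [] => false
  | t :: rest =>
    if t = "," then
      match rest with
      | [] => false
      | _ :: r => pvOkV r
    else true

def pvOkR : List String → Bool
  | [] => false
  | t :: rest =>
    if t = "," then
      match rest with
      | [] => false
      | u :: rest2 =>
        if u = "(" then
          match rest2 with
          | [] => false
          | _ :: rest3 =>
            pvOkV rest3 &&
              (match h : pvSkipV rest3 with
               | [] => false
               | w :: r4 => if w = ")" then pvOkR r4 else true)
        else true
    else true
termination_by ts => ts.length
decreasing_by
  have := pvSkipV_length rest3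
  rw [h] at this
  simp at this ⊢; omega

theorem pv_drop_cons {ts : List String} {i : Nat} {t : String} {rest : List String}
    (h : ts.drop i = t :: rest) :
    i < ts.length ∧ ts[i]! = t ∧ ts.drop (i + 1) = rest := by
  have hl : i < ts.length := by
    by_contra hc
    rw [List.drop_eq_nil_of_le (by omega)] at h
    simp at h
  have h2 := List.drop_eq_getElem_cons hl
  rw [h] at h2
  obtain ⟨ht, hr⟩ := List.cons_eq_cons.mp h2
  exact ⟨hl, by rw [getElem!_pos ts i hl, ht], hr.symm⟩

theorem pvOkV_skip_ne_nil : ∀ (ts : List String), pvOkV ts = true → pvSkipV ts ≠ []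
  | [], h => by simp [pvOkV] at h
  | [t], h => by
    simp only [pvOkV] at h
    by_cases ht : t = ","
    · simp [ht] at h
    · simp [pvSkipV]
  | t :: x :: r, h => by
    simp only [pvOkV] at h
    rw [pvSkipV]
    by_cases ht : t = ","
    · rw [if_pos ht]
      rw [if_pos ht] at h
      exact pvOkV_skip_ne_nil r h
    · rw [if_neg ht]; simp

theorem pvMTOV_skip : ∀ (ts : List String), pvOkV ts = true → pvMTOV ts = some (pvSkipV ts)
  | [], h => by simp [pvOkV] at h
  | [t], h => by
    simp only [pvOkV] at h
    by_cases ht : t = ","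
    · simp [ht] at h
    · simp [pvMTOV, pvSkipV, ht]
  | t :: x :: r, h => by
    simp only [pvOkV] at h
    rw [pvMTOV, pvSkipV]
    by_cases ht : t = ","
    · rw [if_pos ht] at h
      rw [pvMTOV_skip r h]
      simp [ht]
    · simp [ht]

theorem pvScanV_skip (ts : List String) : ∀ (i : Nat), pvOkV (ts.drop i) = true →
    ts.drop (pvScanV ts i) = pvSkipV (ts.drop i) := by
  intro i h
  match hd : ts.drop i with
  | [] => rw [hd] at h; simp [pvOkV] at h
  | [t] =>
    obtain ⟨hl, hg, hd1⟩ := pv_drop_cons hd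
    rw [hd] at h
    simp only [pvOkV] at h
    by_cases ht : t = ","
    · simp [ht] at h
    · rw [pvScanV]
      rw [dif_neg (by rintro ⟨_, hc⟩; rw [hg] at hc; exact ht hc)]
      rw [hd]
      simp [pvSkipV]
  | t :: x :: r =>
    obtain ⟨hl, hg, hd1⟩ := pv_drop_cons hd
    obtain ⟨hl1, hg1, hd2⟩ := pv_drop_cons hd1
    rw [hd] at h
    simp only [pvOkV] at h
    by_cases ht : t = ","
    · rw [if_pos ht] at h
      have hd2' : ts.drop (i + 2) = r := by
        have : i + 1 + 1 = i + 2 := by omega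
        rwa [this] at hd2
      have hrec : ts.drop (pvScanV ts (i + 2)) = pvSkipV (ts.drop (i + 2)) := by
        apply pvScanV_skip ts (i + 2)
        rw [hd2']; exact h
      rw [pvScanV]
      rw [dif_pos ⟨hl, by rw [hg, ht]⟩]
      rw [hrec]
      rw [hd2']
      rw [pvSkipV]
      rw [if_pos ht]
    · rw [pvScanV]
      rw [dif_neg (by rintro ⟨_, hc⟩; rw [hg] at hc; exact ht hc)]
      rw [hd]
      rw [pvSkipV]
      rw [if_neg ht]
termination_by i => ts.length - i
decreasing_by have := pv_drop_cons hd; omega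

theorem pvScanR_main (ts : List String) : ∀ (i : Nat), pvOkR (ts.drop i) = true →
    pvMTORa (ts.drop i) = some (ts.drop (pvScanR ts i)) := by
  intro i h
  match hd : ts.drop i with
  | [] => rw [hd] at h; simp [pvOkR] at h
  | [t] =>
    obtain ⟨hl, hg, hd1⟩ := pv_drop_cons hd
    rw [hd, pvOkR] at h
    by_cases ht : t = ","
    · simp [ht] at h
    · rw [pvMTORa]
      rw [pvScanR]
      rw [dif_neg (by rintro ⟨_, hc⟩; rw [hg] at hc; exact ht hc)]
      rw [hd]
      simp [ht]
  | [t, u] =>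
    obtain ⟨hl, hg, hd1⟩ := pv_drop_cons hd
    obtain ⟨hl1, hg1, hd2⟩ := pv_drop_cons hd1
    rw [hd, pvOkR] at h
    by_cases ht : t = ","
    · by_cases hu : u = "("
      · simp [ht, hu] at h
      · rw [pvMTORa]
        rw [pvScanR]
        rw [dif_pos ⟨hl, by rw [hg, ht]⟩]
        rw [dif_neg (by rintro ⟨_, hc⟩; rw [hg1] at hc; exact hu hc)]
        rw [hd1]
        simp [ht, hu]
    · rw [pvMTORa]
      rw [pvScanR]
      rw [dif_neg (by rintro ⟨_, hc⟩; rw [hg] at hc; exact ht hc)]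
      rw [hd]
      simp [ht]
  | t :: u :: v :: rest3 =>
    obtain ⟨hl, hg, hd1⟩ := pv_drop_cons hd
    obtain ⟨hl1, hg1, hd2⟩ := pv_drop_cons hd1
    obtain ⟨hl2, hg2, hd3⟩ := pv_drop_cons hd2
    have hd3' : ts.drop (i + 3) = rest3 := by
      have : i + 1 + 1 + 1 = i + 3 := by omega
      rwa [this] at hd3
    by_cases ht : t = ","
    · by_cases hu : u = "("
      · match hsk : pvSkipV rest3 with
        | [] =>
          rw [hd, pvOkR, hsk] at h
          simp [ht, hu] at h
        | w :: r4 =>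
          rw [hd, pvOkR, hsk] at h
          simp only [ht, hu, if_true, Bool.and_eq_true] at h
          obtain ⟨hokv, hrest⟩ := h
          have hmtov : pvMTOV rest3 = some (w :: r4) := by
            rw [pvMTOV_skip rest3 hokv, hsk]
          have hscanv : ts.drop (pvScanV ts (i + 3)) = w :: r4 := by
            rw [pvScanV_skip ts (i + 3) (by rw [hd3']; exact hokv), hd3', hsk]
          obtain ⟨hlj, hgj, hdj⟩ := pv_drop_cons hscanv
          have hsc : pvScanR ts i = if w = ")" then pvScanR ts (pvScanV ts (i + 3) + 1)
              else pvScanV ts (i + 3) := by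
            rw [pvScanR]
            rw [dif_pos ⟨hl, by rw [hg, ht]⟩]
            rw [dif_pos ⟨hl1, by rw [hg1, hu]⟩]
            by_cases hw : w = ")"
            · rw [dif_pos ⟨hlj, by rw [hgj, hw]⟩]
              rw [if_pos hw]
            · rw [dif_neg (by rintro ⟨_, hc⟩; rw [hgj] at hc; exact hw hc)]
              rw [if_neg hw]
          rw [pvMTORa]
          simp only [ht, hu, reduceIte]
          split
          · next heq => rw [hmtov] at heq; exact absurd heq (by simp)
          · next r4' heq =>
            rw [hmtov] at heq
            have hinj := Option.some.inj heq
            subst hinj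
            dsimp only
            by_cases hw : w = ")"
            · rw [if_pos hw]
              rw [if_pos hw] at hrest
              rw [hsc]
              rw [if_pos hw]
              have hrec := pvScanR_main ts (pvScanV ts (i + 3) + 1)
                (by rw [hdj]; exact hrest)
              rw [hdj] at hrec
              exact hrec
            · rw [if_neg hw]
              rw [hsc]
              rw [if_neg hw]
              rw [hscanv]
      · rw [hd, pvOkR] at h
        rw [pvMTORa]
        rw [pvScanR]
        rw [dif_pos ⟨hl, by rw [hg, ht]⟩]
        rw [dif_neg (by rintro ⟨_, hc⟩; rw [hg1] at hc; exact hu hc)]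
        rw [hd1]
        simp [ht, hu]
    · rw [pvMTORa]
      rw [pvScanR]
      rw [dif_neg (by rintro ⟨_, hc⟩; rw [hg] at hc; exact ht hc)]
      rw [hd]
      simp [ht]
termination_by i => ts.length - i
decreasing_by
  have h2 := pvScanV_ge ts (i + 3)
  omega


theorem pvAux3_eq : ∀ (ts : List String),
    pvOkAux 3 ts = (pvOkV ts &&
      (match pvSkipV ts with
       | [] => true
       | w :: r4 => if w = ")" then pvOkAux 0 r4 else true))
  | [] => by simp [pvOkAux, pvOkV]
  | [t] => by
    by_cases ht : t = ","
    · simp [pvOkAux, pvOkV, pvSkipV, ht]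
    · by_cases hw : t = ")" <;> simp [pvOkAux, pvOkV, pvSkipV, ht, hw]
  | t :: x :: r => by
    by_cases ht : t = ","
    · have := pvAux3_eq r
      simp [pvOkAux, pvOkV, pvSkipV, ht, this]
    · by_cases hw : t = ")" <;> simp [pvOkAux, pvOkV, pvSkipV, ht, hw]

theorem pvAux0_eq : ∀ (ts : List String), pvOkAux 0 ts = pvOkR ts
  | [] => by simp [pvOkAux, pvOkR]
  | [t] => by by_cases ht : t = "," <;> simp [pvOkAux, pvOkR, ht]
  | [t, u] => by
    by_cases ht : t = "," <;> by_cases hu : u = "(" <;>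
      simp [pvOkAux, pvOkR, ht, hu]
  | t :: u :: v :: rest3 => by
    by_cases ht : t = ","
    · by_cases hu : u = "("
      · have h3 := pvAux3_eq rest3
        rw [pvOkR]
        simp only [ht, hu, reduceIte]
        have hlhs : pvOkAux 0 ("," :: "(" :: v :: rest3) = pvOkAux 3 rest3 := by
          simp [pvOkAux]
        rw [hlhs, h3]
        by_cases hv : pvOkV rest3
        · match hsk : pvSkipV rest3 with
          | [] => exact absurd hsk (pvOkV_skip_ne_nil rest3 hv)
          | w :: r4 =>
            have := pvAux0_eq r4
            simp [hv, this]
        · simp at hv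
          simp [hv]
      · simp [pvOkAux, pvOkR, ht, hu]
    · simp [pvOkAux, pvOkR, ht]
termination_by ts => ts.length
decreasing_by
  have := pvSkipV_length rest3
  rw [hsk] at this
  simp at this ⊢; omega

-- ===== VERDICT (by name: the statement is the Claim_ definition above) =====
theorem moreThanOneRegister_spec : Claim_equal_moreThanOneRegister := by
  intro tokens _ hpre
  unfold Spec_moreThanOneRegister moreThanOneRegister moreThanOneRegister_alt
  rw [pvMTORaF_eq _ _ (by omega), pvScanRF_eq _ _ _ (by omega)]
  have hpre' : pvOkR tokens = true := by
    rw [← pvAux0_eq]; exact hpre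
  have h := pvScanR_main tokens 0 (by simpa using hpre')
  simp only [List.drop_zero] at h
  rw [h]
  rfl
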